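-- pv_equiv track=rewrite | github.com/zane-xu-ai/rag_law | src/chunking/split.py | iter_text_slices
-- ===== SOURCE A (Python) =====
-- from collections.abc import Iterator
--
-- def iter_text_slices(
--     text: str,
--     chunk_size: int,
--     chunk_overlap: int,
-- ) -> Iterator[tuple[str, int, int]]:
--     """
--     对整段文本做字符滑窗，产出 (片段, char_start, char_end)。
--     char_end 为 Python 切片意义下的结束下标（不包含），即 text[char_start:char_end] == 片段。
--     空文本不产生任何片段。
--     """
--     if chunk_overlap >= chunk_size:
--         raise ValueError("chunk_overlap 必须小于 chunk_size")
--     n = len(text)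
--     if n == 0:
--         return
--     step = chunk_size - chunk_overlap
--     start = 0
--     while start < n:
--         end = min(start + chunk_size, n)
--         yield text[start:end], start, end
--         if end >= n:
--             break
--         start += step
-- ===== SOURCE B (Python) =====
-- def iter_text_slices(text, chunk_size, chunk_overlap):
--     """Recursive decomposition: peel the leading window off the remaining suffix,
--     recursing on the tail suffix instead of looping over start indices."""
--     if chunk_overlap >= chunk_size:
--         raise ValueError("chunk_overlap 必须小于 chunk_size")
--     step = chunk_size - chunk_overlap
--
--     def go(rest, off):
--         piece = rest[:chunk_size]
--         yield piece, off, off + len(piece)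
--         if len(rest) > chunk_size and len(rest) > step:
--             yield from go(rest[step:], off + step)
--
--     if text:
--         yield from go(text, 0)
-- ===== Notes on version B (the rewrite author's own statement) =====
-- stated objective: alternative
-- what changed: Replaces A's index-arithmetic while-loop (start/end offsets into the whole text, early break) with a recursive generator that peels the leading window off the remaining suffix string and recurses on rest[step:].
-- intended difference: On nonempty text with chunk_size < 0, A returns pieces cut by Python's negative-slice wraparound together with negative char_end values that contradict its own docstring; B returns the documented window with end = start + len(piece), which is what the docstring specifies (witness: text 'ab', chunk_size -1, chunk_overlap -3). — e.g. on iter_text_slices("ab", -1, -3): A returns [("a", 0, -1)], B returns [("a", 0, 1)]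
import Mathlib
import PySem

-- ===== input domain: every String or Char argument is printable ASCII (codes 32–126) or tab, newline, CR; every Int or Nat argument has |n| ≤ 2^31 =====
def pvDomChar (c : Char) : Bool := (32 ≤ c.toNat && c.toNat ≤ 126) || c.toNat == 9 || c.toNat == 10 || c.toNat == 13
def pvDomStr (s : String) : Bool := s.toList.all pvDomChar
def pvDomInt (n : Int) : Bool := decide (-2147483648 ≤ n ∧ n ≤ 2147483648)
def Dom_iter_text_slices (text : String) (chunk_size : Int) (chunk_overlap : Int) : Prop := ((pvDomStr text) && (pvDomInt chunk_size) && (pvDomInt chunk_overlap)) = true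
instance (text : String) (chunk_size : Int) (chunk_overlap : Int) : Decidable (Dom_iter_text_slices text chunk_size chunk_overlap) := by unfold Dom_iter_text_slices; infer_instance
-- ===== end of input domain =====

-- B replaces A's index-driven while loop by a recursive generator peeling the leading window
-- off the remaining suffix string; on chunk_size < 0 (where A's reported slice ends are
-- negative) B returns the documented non-negative end offsets — see D_ below.

-- ===== PORT A =====
-- A's while loop: start advances by step, stops after the window whose end reaches n;
-- fuel (n+1 at the top call) bounds the recursion and is never exhausted before the loop exits
def pvALoop (text : String) (chunk_size step n : Int) (start : Int) (fuel : Nat) : List (String × Int × Int) :=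
  match fuel with
  | 0 => []
  | f+1 =>
    if start < n then
      let e := min (start + chunk_size) n
      let piece := PySem.Str.slice text (some start) (some e)
      if e ≥ n then [(piece, start, e)]
      else (piece, start, e) :: pvALoop text chunk_size step n (start + step) f
    else []

def iter_text_slices (text : String) (chunk_size : Int) (chunk_overlap : Int) : List (String × Int × Int) :=
  if chunk_overlap ≥ chunk_size then []   -- Python raises ValueError here; excluded by Pre_
  else
    let n : Int := PySem.Str.len text
    if n = 0 then []
    else pvALoop text chunk_size (chunk_size - chunk_overlap) n 0 (n.toNat + 1)

-- ===== PORT B =====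
-- Source B's recursive generator go(rest, off): yield the leading window of the suffix rest,
-- recurse on rest[step:]; fuel (len(text)+1 at the top call) bounds the recursion and is
-- never exhausted before the Python recursion stops
def pvBGo (chunk_size step : Int) (rest : String) (off : Int) (fuel : Nat) : List (String × Int × Int) :=
  match fuel with
  | 0 => []
  | f+1 =>
    let piece := PySem.Str.slice rest none (some chunk_size)
    let out := (piece, off, off + PySem.Str.len piece)
    if PySem.Str.len rest > chunk_size ∧ PySem.Str.len rest > step then
      out :: pvBGo chunk_size step (PySem.Str.slice rest (some step) none) (off + step) f
    else [out]

def iter_text_slices_alt (text : String) (chunk_size : Int) (chunk_overlap : Int) : List (String × Int × Int) :=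
  if chunk_overlap ≥ chunk_size then []   -- Python raises ValueError here; excluded by Pre_
  else
    let step := chunk_size - chunk_overlap
    if text = "" then []
    else pvBGo chunk_size step text 0 (text.toList.length + 1)

-- ===== PRECONDITION & SPEC =====
-- Pre_ excludes exactly the inputs on which A raises ValueError (chunk_overlap ≥ chunk_size)
def Pre_iter_text_slices (text : String) (chunk_size : Int) (chunk_overlap : Int) : Prop :=
  chunk_overlap < chunk_size
instance (text : String) (chunk_size : Int) (chunk_overlap : Int) : Decidable (Pre_iter_text_slices text chunk_size chunk_overlap) := by unfold Pre_iter_text_slices; infer_instance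
def pvWitness_iter_text_slices : String × Int × Int := ("hello world", 4, 1)

-- On nonempty text with chunk_size < 0, A returns pieces cut by Python's negative-slice
-- wraparound and NEGATIVE char_end values contradicting its own docstring
-- (text[char_start:char_end] == piece fails); B returns the documented window
-- (piece, off, off + len(piece)) with a non-negative end, which is the intended value.
def D_iter_text_slices (text : String) (chunk_size : Int) (chunk_overlap : Int) : Prop :=
  text ≠ "" ∧ chunk_size < 0
instance (text : String) (chunk_size : Int) (chunk_overlap : Int) : Decidable (D_iter_text_slices text chunk_size chunk_overlap) := by unfold D_iter_text_slices; infer_instance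

def Spec_iter_text_slices (text : String) (chunk_size : Int) (chunk_overlap : Int) (out : List (String × Int × Int)) : Prop := ¬ D_iter_text_slices text chunk_size chunk_overlap → out = iter_text_slices_alt text chunk_size chunk_overlap
instance (text : String) (chunk_size : Int) (chunk_overlap : Int) (out : List (String × Int × Int)) : Decidable (Spec_iter_text_slices text chunk_size chunk_overlap out) := by unfold Spec_iter_text_slices; infer_instance

def pvDiffWitness_iter_text_slices : String × Int × Int := ("ab", -1, -3)
def pvDiffWitnessOut_iter_text_slices : (List (String × Int × Int)) × (List (String × Int × Int)) :=
  ([("a", 0, -1)], [("a", 0, 1)])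

-- ===== CLAIM (what is proved, stated in full; the proofs are below) =====
def Claim_unchanged_iter_text_slices : Prop := ∀ (text : String) (chunk_size : Int) (chunk_overlap : Int), Dom_iter_text_slices text chunk_size chunk_overlap → Pre_iter_text_slices text chunk_size chunk_overlap → Spec_iter_text_slices text chunk_size chunk_overlap (iter_text_slices text chunk_size chunk_overlap)
def Claim_changed_iter_text_slices : Prop := Dom_iter_text_slices (pvDiffWitness_iter_text_slices.1) (pvDiffWitness_iter_text_slices.2.1) (pvDiffWitness_iter_text_slices.2.2) ∧ Pre_iter_text_slices (pvDiffWitness_iter_text_slices.1) (pvDiffWitness_iter_text_slices.2.1) (pvDiffWitness_iter_text_slices.2.2) ∧ D_iter_text_slices (pvDiffWitness_iter_text_slices.1) (pvDiffWitness_iter_text_slices.2.1) (pvDiffWitness_iter_text_slices.2.2) ∧ iter_text_slices (pvDiffWitness_iter_text_slices.1) (pvDiffWitness_iter_text_slices.2.1) (pvDiffWitness_iter_text_slices.2.2) = pvDiffWitnessOut_iter_text_slices.1 ∧ iter_text_slices_alt (pvDiffWitness_iter_text_slices.1) (pvDiffWitness_iter_text_slices.2.1) (pvDiffWitness_iter_text_slices.2.2)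 = pvDiffWitnessOut_iter_text_slices.2 ∧ pvDiffWitnessOut_iter_text_slices.1 ≠ pvDiffWitnessOut_iter_text_slices.2
def Claim_exact_iter_text_slices : Prop := ∀ (text : String) (chunk_size : Int) (chunk_overlap : Int), Dom_iter_text_slices text chunk_size chunk_overlap → Pre_iter_text_slices text chunk_size chunk_overlap → D_iter_text_slices text chunk_size chunk_overlap → iter_text_slices text chunk_size chunk_overlap ≠ iter_text_slices_alt text chunk_size chunk_overlap

-- ===== LEMMAS AND PROOFS =====

theorem pvALoop_nil (text : String) (cs step n start : Int) (h : ¬ start < n) (fuel : Nat) :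
    pvALoop text cs step n start fuel = [] := by
  cases fuel <;> simp [pvALoop, h]

-- the two loops agree window by window: A's loop at index start equals B's recursion on text[start:]
theorem pvLoop_agree (text : String) (chunk_size step : Int)
    (hcs : 0 ≤ chunk_size) (hstep : 0 < step)
    (start : Int) (h0 : 0 ≤ start) (hlt : start < (text.toList.length : Int))
    (fuel : Nat) :
    pvALoop text chunk_size step (text.toList.length : Int) start fuel =
      pvBGo chunk_size step (String.ofList (text.toList.drop start.toNat)) start fuel := by
  induction fuel generalizing start with
  | zero => simp [pvALoop, pvBGo]
  | succ f ih =>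
    have hn0 : (0:Int) ≤ (text.toList.length : Int) := Int.natCast_nonneg _
    set l := text.toList with hl
    set n : Int := (l.length : Int) with hn
    set rest := String.ofList (l.drop start.toNat) with hrest
    have hdrop : rest.toList = l.drop start.toNat := String.toList_ofList
    have hrlen : PySem.Str.len rest = n - start := by
      simp [pysem, hdrop]; omega
    have hemin0 : (0:Int) ≤ min (start + chunk_size) n := by omega
    have hpiece : PySem.Str.slice text (some start) (some (min (start + chunk_size) n)) =
        PySem.Str.slice rest none (some chunk_size) := by
      apply String.toList_inj.mp
      simp only [pysem, hdrop, ← hl]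
      rw [PySem.List.slice_toNat _ h0 hemin0, PySem.List.slice_to _ hcs]
      apply List.take_eq_take_iff.mpr
      simp [List.length_drop]
      omega
    have hplen : PySem.Str.len (PySem.Str.slice rest none (some chunk_size)) =
        min (start + chunk_size) n - start := by
      simp only [pysem, hdrop, PySem.List.slice_to _ hcs]
      simp [List.length_take, List.length_drop]
      omega
    have htup : (PySem.Str.slice text (some start) (some (min (start + chunk_size) n)), start,
          min (start + chunk_size) n) =
        (PySem.Str.slice rest none (some chunk_size), start,
          start + PySem.Str.len (PySem.Str.slice rest none (some chunk_size))) := by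
      rw [hpiece, hplen]
      congr 2
      omega
    have hsuf : PySem.Str.slice rest (some step) none =
        String.ofList (l.drop (start + step).toNat) := by
      apply String.toList_inj.mp
      simp only [pysem, hdrop]
      rw [PySem.List.slice_from _ (le_of_lt hstep), String.toList_ofList, List.drop_drop]
      congr 1
      omega
    simp only [pvALoop, pvBGo, if_pos hlt]
    by_cases hc1 : start + chunk_size < n
    · by_cases hc2 : start + step < n
      · -- both produce this window and continue
        rw [if_neg (by omega), if_pos (by rw [hrlen]; constructor <;> omega)]
        rw [htup, hsuf]
        rw [ih (start + step) (by omega) (by omega)]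
      · -- A recurses into an empty loop; B stops: same last window
        rw [if_neg (by omega), if_neg (by rw [hrlen]; omega)]
        rw [pvALoop_nil _ _ _ _ _ (by omega), htup]
    · -- last window for both
      rw [if_pos (by omega), if_neg (by rw [hrlen]; omega), htup]

-- ===== VERDICT (by name: the statements are the Claim_ definitions above) =====
theorem iter_text_slices_spec : Claim_unchanged_iter_text_slices := by
  intro text chunk_size chunk_overlap _ hpre hnD
  unfold iter_text_slices iter_text_slices_alt
  have hge : ¬ (chunk_overlap ≥ chunk_size) := not_le.mpr hpre
  simp only [if_neg hge]
  by_cases htext : text = ""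
  · subst htext
    simp [pysem]
  · have hcs : 0 ≤ chunk_size := by
      by_contra h
      exact hnD ⟨htext, by omega⟩
    have hlne : text.toList ≠ [] := fun h => htext (by
      have := congrArg String.ofList h
      rwa [String.ofList_toList] at this)
    have hlen : 0 < text.toList.length := List.length_pos_of_ne_nil hlne
    rw [if_neg htext, if_neg (by simp [pysem]; omega)]
    have h := pvLoop_agree text chunk_size (chunk_size - chunk_overlap) hcs (by omega)
      0 le_rfl (by exact_mod_cast hlen) (text.toList.length + 1)
    simp only [Int.toNat_zero, List.drop_zero, String.ofList_toList] at h
    rw [show (PySem.Str.len text).toNat = text.toList.length by simp [pysem]]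
    exact h

theorem iter_text_slices_changed : Claim_changed_iter_text_slices := by
  unfold Claim_changed_iter_text_slices; decide

theorem iter_text_slices_tight : Claim_exact_iter_text_slices := by
  intro text chunk_size chunk_overlap _ hpre hD heq
  obtain ⟨ht, hcs⟩ := hD
  have hge : ¬ (chunk_overlap ≥ chunk_size) := not_le.mpr hpre
  have hlne : text.toList ≠ [] := fun h => ht (by
    have := congrArg String.ofList h
    rwa [String.ofList_toList] at this)
  have hlen : 0 < text.toList.length := List.length_pos_of_ne_nil hlne
  have hn : (0:Int) < (text.toList.length : Int) := by exact_mod_cast hlen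
  simp only [iter_text_slices, iter_text_slices_alt, if_neg hge, if_neg ht] at heq
  rw [if_neg (by simp [pysem]; omega)] at heq
  rw [show (PySem.Str.len text).toNat = text.toList.length by simp [pysem]] at heq
  have hnlen : PySem.Str.len text = (text.toList.length : Int) := by simp [pysem]
  rw [hnlen] at heq
  -- unfold one step of each loop; compare the third component of the first window
  simp only [pvALoop, pvBGo] at heq
  rw [if_pos hn] at heq
  have hmin : min (0 + chunk_size) (text.toList.length : Int) = chunk_size := by omega
  rw [hmin] at heq
  rw [if_neg (by omega)] at heq
  have hp0 : (0:Int) ≤ PySem.Str.len (PySem.Str.slice text none (some chunk_size)) := by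
    simp [pysem]
  split_ifs at heq
  · have := congrArg (fun xs => xs.head?) heq
    simp at this
    omega
  · have := congrArg (fun xs => xs.head?) heq
    simp at this
    omega
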